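-- pv_equiv track=rewrite | github.com/d6ms/atcoder | abc/123/b.py | solve
-- ===== SOURCE A (Python) =====
-- def solve(candidates):
--     curr_time = 0
--     candidates = sorted(candidates)
--     while len(candidates) > 0:
--         if curr_time % 10 != 0:
--             curr_time += 10 - (curr_time % 10)
--         losses = list(map(lambda c: calc_loss(curr_time, c), candidates))
--         min_loss = losses[0]
--         min_loss_candidate_idx = 0
--         for i, loss in enumerate(losses):
--             if loss <= min_loss:
--                 min_loss = loss
--                 min_loss_candidate_idx = i
--         dish = candidates.pop(min_loss_candidate_idx)
--         curr_time += dish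
--     return curr_time
--
-- def calc_loss(curr_time, candidate):
--     return (10 - ((curr_time + candidate) % 10)) % 10
-- ===== SOURCE B (Python) =====
-- def solve(candidates):
--     total = 0
--     max_loss = 0
--     for x in candidates:
--         c = (x + 9) // 10 * 10
--         total += c
--         loss = c - x
--         if loss > max_loss:
--             max_loss = loss
--     return total - max_loss
-- ===== Notes on version B (the rewrite author's own statement) =====
-- stated objective: faster
-- what changed: Replaced the O(n^2) greedy simulation (sort, then repeatedly rescan all remaining dishes for the minimum rounding loss and pop it) by a single O(n) pass: total = sum of each dish rounded up to a multiple of 10, minus the maximum rounding loss.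
import Mathlib
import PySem

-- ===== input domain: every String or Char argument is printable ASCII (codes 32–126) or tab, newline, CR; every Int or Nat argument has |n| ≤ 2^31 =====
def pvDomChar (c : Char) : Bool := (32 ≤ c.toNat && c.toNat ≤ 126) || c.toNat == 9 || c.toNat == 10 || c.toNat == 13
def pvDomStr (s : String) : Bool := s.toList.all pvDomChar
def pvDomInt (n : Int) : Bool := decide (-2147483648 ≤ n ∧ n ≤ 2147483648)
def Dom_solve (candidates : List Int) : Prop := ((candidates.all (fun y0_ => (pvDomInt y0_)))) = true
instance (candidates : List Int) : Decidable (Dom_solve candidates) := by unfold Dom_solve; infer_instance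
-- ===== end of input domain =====

-- B replaces A's O(n^2) greedy simulation by one O(n) pass: sum of each dish rounded
-- up to a multiple of 10, minus the maximum rounding loss.

-- ===== PORT A =====
def calc_loss (curr_time candidate : Int) : Int :=
  PySem.Int.mod (10 - PySem.Int.mod (curr_time + candidate) 10) 10

-- the while-loop of A: state (curr_time, candidates); terminates because pop shrinks the list
def solveLoop : Int → List Int → Int
  | t, [] => t
  | t, c :: cs =>
    let t1 := if PySem.Int.mod t 10 ≠ 0 then t + (10 - PySem.Int.mod t 10) else t
    let losses := (c :: cs).map (fun x => calc_loss t1 x)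
    let mj := (PySem.List.enumerate losses).foldl
        (fun acc il => if il.2 ≤ acc.1 then (il.2, il.1) else acc) (calc_loss t1 c, 0)
    match _hp : PySem.List.pop? (c :: cs) mj.2 with
    | some dr => solveLoop (t1 + dr.1) dr.2
    | none => t1   -- unreachable: the selected index is always in range
  termination_by _ l => l.length
  decreasing_by
    have := PySem.List.length_of_pop?_eq_some _ _hp
    simp at this ⊢
    omega

def solve (candidates : List Int) : Int :=
  solveLoop 0 (PySem.List.sorted candidates (fun x => x) false)

-- ===== PORT B =====
def solve_alt (candidates : List Int) : Int :=
  let p := candidates.foldl (fun (acc : Int × Int) x =>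
      let c := PySem.Int.floordiv (x + 9) 10 * 10
      let loss := c - x
      (acc.1 + c, if loss > acc.2 then loss else acc.2)) (0, 0)
  p.1 - p.2

-- ===== PRECONDITION & SPEC =====
def Spec_solve (candidates : List Int) (out : Int) : Prop := out = solve_alt candidates
instance (candidates : List Int) (out : Int) : Decidable (Spec_solve candidates out) := by unfold Spec_solve; infer_instance

-- ===== CLAIM (what is proved, stated in full; the proofs are below) =====
def Claim_equal_solve : Prop := ∀ (candidates : List Int), Dom_solve candidates → Spec_solve candidates (solve candidates)

-- ===== LEMMAS AND PROOFS =====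

-- ceiling of x to a multiple of 10, and its rounding loss
def ceil10 (x : Int) : Int := (x + 9) / 10 * 10
def lossOf (x : Int) : Int := ceil10 x - x

-- fold-max with initial value 0 (all losses are nonnegative)
def fmax (l : List Int) : Int := l.foldl max 0

theorem lossOf_nonneg (x : Int) : 0 ≤ lossOf x := by
  unfold lossOf ceil10; omega

theorem calc_loss_eq (t x : Int) (h : t % 10 = 0) :
    calc_loss t x = lossOf x := by
  unfold calc_loss lossOf ceil10
  rw [PySem.Int.mod_eq_emod_of_pos (by norm_num), PySem.Int.mod_eq_emod_of_pos (by norm_num)]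
  omega

theorem fmax_le_of_mem (l : List Int) (x : Int) (h : x ∈ l) : x ≤ fmax l :=
  (PySem.List.le_foldl_max l 0).2 x h

theorem fmax_nonneg (l : List Int) : 0 ≤ fmax l :=
  (PySem.List.le_foldl_max l 0).1

theorem foldl_max_mem_cons (l : List Int) : ∀ a : Int, l.foldl max a ∈ a :: l := by
  induction l with
  | nil => simp
  | cons x t ih =>
    intro a
    have h := ih (max a x)
    rcases List.mem_cons.mp h with h | h
    · rw [List.foldl_cons]
      rcases max_choice a x with hm | hm <;> rw [hm] at h ⊢ <;> simp [h]
    · simp [List.foldl_cons, List.mem_cons.mpr (Or.inr (List.mem_cons.mpr (Or.inr h)))]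

theorem fmax_mem (l : List Int) (hne : l ≠ []) (hpos : ∀ x ∈ l, 0 ≤ x) : fmax l ∈ l := by
  have h := foldl_max_mem_cons l 0
  rcases List.mem_cons.mp h with h | h
  · rcases l with _ | ⟨y, t⟩
    · exact absurd rfl hne
    · have h1 : y ≤ fmax (y :: t) := fmax_le_of_mem _ y (by simp)
      have h2 : 0 ≤ y := hpos y (by simp)
      have h0 : fmax (y :: t) = 0 := h
      rw [h0] at h1 ⊢
      have hy : y = 0 := le_antisymm h1 h2
      rw [← hy]; simp
  · exact h

theorem fmax_le_of_forall (l : List Int) (b : Int) (hb : 0 ≤ b) (h : ∀ x ∈ l, x ≤ b) :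
    fmax l ≤ b := by
  have hc := foldl_max_mem_cons l 0
  rcases List.mem_cons.mp hc with heq | hmem
  · show l.foldl max 0 ≤ b
    rw [heq]; exact hb
  · exact h _ hmem

theorem fmax_perm {l m : List Int} (h : l.Perm m) : fmax l = fmax m :=
  List.Perm.foldl_eq h 0

-- removing one occurrence of the minimum from a list of length ≥ 2 keeps the max
theorem fmax_eraseIdx (l : List Int) (k : Nat) (hk : k < l.length) (hlen : 2 ≤ l.length)
    (hpos : ∀ x ∈ l, 0 ≤ x) (hmin : ∀ x ∈ l, l[k] ≤ x) :
    fmax (l.eraseIdx k) = fmax l := by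
  have hperm : (l[k] :: l.eraseIdx k).Perm l := List.getElem_cons_eraseIdx_perm hk
  have hsub : ∀ x ∈ l.eraseIdx k, x ∈ l := fun x hx =>
    hperm.mem_iff.mp (List.mem_cons.mpr (Or.inr hx))
  apply le_antisymm
  · exact fmax_le_of_forall _ _ (fmax_nonneg l) (fun x hx => fmax_le_of_mem l x (hsub x hx))
  · have hm : fmax l ∈ l := fmax_mem l (by intro h; rw [h] at hlen; simp at hlen) hpos
    have hern : l.eraseIdx k ≠ [] := by
      have := List.length_eraseIdx_of_lt hk
      intro h; rw [h] at this; simp at this; omega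
    rcases List.mem_cons.mp (hperm.mem_iff.mpr hm) with heq | hmem
    · rcases List.exists_mem_of_ne_nil _ hern with ⟨y, hy⟩
      have h1 : y ≤ fmax l := fmax_le_of_mem l y (hsub y hy)
      have h2 : l[k] ≤ y := hmin y (hsub y hy)
      have : y = fmax l := le_antisymm h1 (heq ▸ h2)
      exact this ▸ fmax_le_of_mem _ y hy
    · exact fmax_le_of_mem _ _ hmem

-- the selection fold: its result is either the seed or one of the scanned pairs, and it is ≤ all of them
theorem sel_spec (ps : List (Int × Int)) : ∀ (acc : Int × Int),
    (ps.foldl (fun acc il => if il.2 ≤ acc.1 then (il.2, il.1) else acc) acc = acc ∨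
      ((ps.foldl (fun acc il => if il.2 ≤ acc.1 then (il.2, il.1) else acc) acc).2,
       (ps.foldl (fun acc il => if il.2 ≤ acc.1 then (il.2, il.1) else acc) acc).1) ∈ ps) ∧
    (ps.foldl (fun acc il => if il.2 ≤ acc.1 then (il.2, il.1) else acc) acc).1 ≤ acc.1 ∧
    ∀ p ∈ ps, (ps.foldl (fun acc il => if il.2 ≤ acc.1 then (il.2, il.1) else acc) acc).1 ≤ p.2 := by
  induction ps with
  | nil => intro acc; simp
  | cons p t ih =>
    intro acc
    simp only [List.foldl_cons]
    by_cases hle : p.2 ≤ acc.1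
    · rw [if_pos hle]
      obtain ⟨h1, h2, h3⟩ := ih (p.2, p.1)
      refine ⟨?_, le_trans h2 hle, ?_⟩
      · rcases h1 with h | h
        · rw [h]; simp
        · exact Or.inr (List.mem_cons.mpr (Or.inr h))
      · intro q hq
        rcases List.mem_cons.mp hq with hq | hq
        · subst hq; exact h2
        · exact h3 q hq
    · rw [if_neg hle]
      obtain ⟨h1, h2, h3⟩ := ih acc
      refine ⟨?_, h2, ?_⟩
      · rcases h1 with h | h
        · exact Or.inl h
        · exact Or.inr (List.mem_cons.mpr (Or.inr h))
      · intro q hq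
        rcases List.mem_cons.mp hq with hq | hq
        · subst hq; omega
        · exact h3 q hq

theorem fmax_singleton (x : Int) (hx : 0 ≤ x) : fmax [x] = x := by
  simp [fmax, max_eq_right hx]

theorem t1_eq_ceil10 (t : Int) :
    (if PySem.Int.mod t 10 ≠ 0 then t + (10 - PySem.Int.mod t 10) else t) = ceil10 t := by
  rw [PySem.Int.mod_eq_emod_of_pos (by norm_num : (0:Int) < 10)]
  unfold ceil10; split_ifs <;> omega

theorem ceil10_mod (t : Int) : ceil10 t % 10 = 0 := by
  unfold ceil10; omega

theorem ceil10_add (t d : Int) (h : t % 10 = 0) : ceil10 (t + d) = t + ceil10 d := by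
  unfold ceil10; omega

theorem solveLoop_spec : ∀ (n : Nat) (cs : List Int), cs.length = n → cs ≠ [] → ∀ t : Int,
    solveLoop t cs = ceil10 t + (cs.map ceil10).sum - fmax (cs.map lossOf) := by
  intro n
  induction n using Nat.strong_induction_on with
  | _ n ih =>
  intro cs hlen hne t
  rcases cs with _ | ⟨c, cs⟩
  · exact absurd rfl hne
  have hmod : ceil10 t % 10 = 0 := ceil10_mod t
  have hlosses : (c :: cs).map (fun x => calc_loss (ceil10 t) x) = (c :: cs).map lossOf :=
    List.map_congr_left (fun x _ => calc_loss_eq (ceil10 t) x hmod)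
  set L := (c :: cs).map lossOf with hL
  set mj := (PySem.List.enumerate L 0).foldl
      (fun acc il => if il.2 ≤ acc.1 then (il.2, il.1) else acc) (lossOf c, 0) with hmj
  obtain ⟨h1, _, h3⟩ := sel_spec (PySem.List.enumerate L 0) (lossOf c, 0)
  -- mj = (L[k], k) for some valid index k
  have hkex : ∃ k : Nat, ∃ hck : k < (c :: cs).length,
      mj.2 = (k : Int) ∧ mj.1 = L[k]'(by simpa [hL] using hck) := by
    rcases h1 with h | h
    · refine ⟨0, by simp, by rw [← hmj] at h; rw [h]; simp, by rw [← hmj] at h; rw [h]; simp [hL]⟩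
    · rw [← hmj, PySem.List.mem_enumerate_iff] at h
      obtain ⟨k, hk, hpk⟩ := h
      have hk' : k < (c :: cs).length := by simpa [hL] using hk
      refine ⟨k, hk', ?_, ?_⟩
      · have := congrArg Prod.fst hpk; simpa using this
      · have := congrArg Prod.snd hpk; simpa using this
    
  obtain ⟨k, hck, hk2, hk1⟩ := hkex
  have hk : k < (c :: cs).length := hck
  -- mj.1 is ≤ every loss
  have hmin : ∀ x ∈ L, mj.1 ≤ x := by
    intro x hx
    obtain ⟨j, hj, hxe⟩ := List.mem_iff_getElem.mp hx
    have hm : ((j : Int), x) ∈ PySem.List.enumerate L 0 := by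
      rw [PySem.List.mem_enumerate_iff]
      exact ⟨j, hj, by simp [hxe]⟩
    have := h3 _ hm
    rw [← hmj] at this
    simpa using this
  have hdl : L[k]'(by simpa [hL] using hk) = lossOf ((c :: cs)[k]) := by
    simp only [hL, List.getElem_map]
  have hpop : PySem.List.pop? (c :: cs) mj.2 = some ((c :: cs)[k], (c :: cs).eraseIdx k) := by
    rw [hk2]; exact PySem.List.pop?_natCast (c :: cs) k hk
  rw [solveLoop]
  split
  case h_2 dr hp =>
    -- the none branch is unreachable: bring hp to the shape of hpop and contradict
    rw [t1_eq_ceil10 t, hlosses, calc_loss_eq (ceil10 t) c hmod, ← hmj] at hp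
    rw [hpop] at hp
    exact absurd hp (by simp)
  case h_1 dr hp =>
    rw [t1_eq_ceil10 t, hlosses, calc_loss_eq (ceil10 t) c hmod, ← hmj] at hp
    rw [hpop] at hp
    obtain rfl : dr = ((c :: cs)[k], (c :: cs).eraseIdx k) := by
      exact (Option.some.injEq _ _ ▸ hp).symm
    rw [t1_eq_ceil10 t]
    rcases hrest : (c :: cs).eraseIdx k with _ | ⟨r, rs⟩
    · -- the list had a single element: k = 0, cs = []
      have h0 : ((c :: cs).eraseIdx k).length = (c :: cs).length - 1 :=
        List.length_eraseIdx_of_lt hk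
      rw [hrest] at h0
      simp at h0
      have hcs : cs = [] := by
        cases cs with
        | nil => rfl
        | cons a l => simp at h0
      subst hcs
      have hk0 : k = 0 := by simp at hk; omega
      subst hk0
      show solveLoop (ceil10 t + c) [] = ceil10 t + (List.map ceil10 [c]).sum - fmax L
      rw [hL]
      simp only [solveLoop, List.map_cons, List.map_nil, List.sum_cons, List.sum_nil]
      rw [fmax_singleton (lossOf c) (lossOf_nonneg c)]
      unfold lossOf; ring
    · rw [← hrest]
      have hrne : (c :: cs).eraseIdx k ≠ [] := by rw [hrest]; simp
      have hrlen : ((c :: cs).eraseIdx k).length < n := by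
        rw [List.length_eraseIdx_of_lt hk]; omega
      rw [ih _ hrlen _ rfl hrne]
      have hperm : ((c :: cs)[k] :: (c :: cs).eraseIdx k).Perm (c :: cs) :=
        List.getElem_cons_eraseIdx_perm hk
      have hsum : (((c :: cs).eraseIdx k).map ceil10).sum
          = ((c :: cs).map ceil10).sum - ceil10 ((c :: cs)[k]) := by
        have := (hperm.map ceil10).sum_eq
        simp only [List.map_cons, List.sum_cons] at this ⊢
        omega
      have hfm : fmax (((c :: cs).eraseIdx k).map lossOf) = fmax L := by
        rw [hL, ← List.eraseIdx_map]
        refine fmax_eraseIdx (List.map lossOf (c :: cs)) k (by simpa using hk) ?_ ?_ ?_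
        · have h0 : ((c :: cs).eraseIdx k).length = (c :: cs).length - 1 :=
            List.length_eraseIdx_of_lt hk
          rw [hrest] at h0
          simp at h0 ⊢
          omega
        · intro x hx
          obtain ⟨y, _, rfl⟩ := List.mem_map.mp hx
          exact lossOf_nonneg y
        · intro x hx
          have hgk : (List.map lossOf (c :: cs))[k]'(by simpa using hk) = mj.1 := by
            rw [hk1]
          rw [hgk]
          exact hmin x (by rw [hL]; exact hx)
      rw [hsum, hfm, ceil10_add _ _ hmod]
      ring

-- B's fold in closed form
theorem altFold (l : List Int) : ∀ a b : Int,
    l.foldl (fun (acc : Int × Int) x =>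
      let c := PySem.Int.floordiv (x + 9) 10 * 10
      let loss := c - x
      (acc.1 + c, if loss > acc.2 then loss else acc.2)) (a, b)
    = (a + (l.map ceil10).sum, (l.map lossOf).foldl max b) := by
  induction l with
  | nil => simp
  | cons x t ih =>
    intro a b
    simp only [List.foldl_cons, List.map_cons, List.sum_cons]
    rw [ih]
    have hc : PySem.Int.floordiv (x + 9) 10 * 10 = ceil10 x := by
      rw [PySem.Int.floordiv_eq_ediv_of_pos (by norm_num)]; rfl
    have hl : (if ceil10 x - x > b then ceil10 x - x else b) = max b (lossOf x) := by
      unfold lossOf; simp only [max_def]; split_ifs <;> omega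
    simp only [hc, hl]
    simp [add_assoc]

theorem solve_alt_spec (candidates : List Int) :
    solve_alt candidates = (candidates.map ceil10).sum - fmax (candidates.map lossOf) := by
  unfold solve_alt
  rw [altFold]
  simp [fmax]

-- ===== VERDICT (by name: the statement is the Claim_ definition above) =====
theorem solve_spec : Claim_equal_solve := by
  intro cs _
  unfold Spec_solve
  rw [solve_alt_spec]
  unfold solve
  rcases h : PySem.List.sorted cs (fun x => x) false with _ | ⟨a, l⟩
  · have : cs = [] := by
      have := PySem.List.sorted_perm cs (fun x => x) false
      rw [h] at this
      exact this.symm.eq_nil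
    subst this
    simp [solveLoop, fmax]
  · have hperm : (a :: l).Perm cs := by
      have := PySem.List.sorted_perm cs (fun x => x) false
      rwa [h] at this
    rw [← h, h]
    rw [solveLoop_spec (a :: l).length (a :: l) rfl (by simp) 0]
    have h1 : ((a :: l).map ceil10).sum = (cs.map ceil10).sum :=
      (hperm.map ceil10).sum_eq
    have h2 : fmax ((a :: l).map lossOf) = fmax (cs.map lossOf) :=
      fmax_perm (hperm.map lossOf)
    have hz : ceil10 (0:Int) = 0 := by norm_num [ceil10]
    rw [hz, h1, h2]; ring
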